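-- pv_equiv track=rewrite | github.com/stanislavlevin/freeipa-altlinux | ipatests/pytest_ipa/integration/tasks.py | is_subdomain
-- ===== SOURCE A (Python) =====
-- def is_subdomain(subdomain: str, domain: str) -> bool:
--     subdomain_unpacked = subdomain.split('.')
--     domain_unpacked = domain.split('.')
--
--     subdomain_unpacked.reverse()
--     domain_unpacked.reverse()
--
--     issubdomain = False
--
--     if len(subdomain_unpacked) > len(domain_unpacked):
--         issubdomain = True
--
--         for subdomain_segment, domain_segment in zip(subdomain_unpacked,
--                                                      domain_unpacked):
--             issubdomain = issubdomain and subdomain_segment == domain_segment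
--
--     return issubdomain
-- ===== SOURCE B (Python) =====
-- def is_subdomain(subdomain: str, domain: str) -> bool:
--     return subdomain.endswith('.' + domain)
-- ===== Notes on version B (the rewrite author's own statement) =====
-- stated objective: idiomatic
-- what changed: Replaced the split/reverse/zip label-list loop by a single suffix test: subdomain.endswith('.' + domain), whose leading dot enforces both the extra-label requirement and the label-boundary alignment.
import Mathlib
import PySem

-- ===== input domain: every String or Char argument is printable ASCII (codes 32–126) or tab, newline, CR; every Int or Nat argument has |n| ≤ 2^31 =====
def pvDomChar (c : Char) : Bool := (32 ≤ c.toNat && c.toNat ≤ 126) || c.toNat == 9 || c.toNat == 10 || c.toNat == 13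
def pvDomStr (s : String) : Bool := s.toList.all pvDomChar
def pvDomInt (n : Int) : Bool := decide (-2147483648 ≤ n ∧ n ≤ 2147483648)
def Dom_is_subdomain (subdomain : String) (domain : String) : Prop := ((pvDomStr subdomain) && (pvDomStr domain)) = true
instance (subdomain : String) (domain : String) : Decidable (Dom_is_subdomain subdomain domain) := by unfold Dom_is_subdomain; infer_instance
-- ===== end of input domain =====

-- B replaces A's split/reverse/zip label loop by the single suffix test subdomain.endswith('.' + domain) (idiomatic; same cost).

-- ===== PORT A =====
-- split('.') has a non-empty literal separator, so Python never raises; we port it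
-- directly as PySem.Chars.splitOn on the code-point lists (Str.split? is its thin wrapper).
def is_subdomain (subdomain : String) (domain : String) : Bool :=
  let subdomain_unpacked := (PySem.Chars.splitOn subdomain.toList ['.']).reverse
  let domain_unpacked := (PySem.Chars.splitOn domain.toList ['.']).reverse
  if domain_unpacked.length < subdomain_unpacked.length then
    -- issubdomain = True; for …: issubdomain = issubdomain and (seg == seg)
    (subdomain_unpacked.zip domain_unpacked).foldl (fun acc p => acc && (p.1 == p.2)) true
  else
    false

-- ===== PORT B =====
def is_subdomain_alt (subdomain : String) (domain : String) : Bool :=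
  PySem.Str.endswith subdomain ("." ++ domain)

-- ===== PRECONDITION & SPEC =====
def Spec_is_subdomain (subdomain : String) (domain : String) (out : Bool) : Prop := out = is_subdomain_alt subdomain domain
instance (subdomain : String) (domain : String) (out : Bool) : Decidable (Spec_is_subdomain subdomain domain out) := by unfold Spec_is_subdomain; infer_instance

-- ===== CLAIM (what is proved, stated in full; the proofs are below) =====
def Claim_equal_is_subdomain : Prop := ∀ (subdomain : String) (domain : String), Dom_is_subdomain subdomain domain → Spec_is_subdomain subdomain domain (is_subdomain subdomain domain)

-- ===== LEMMAS AND PROOFS =====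

/-- Simple structural recursion computing `s.split('.')` on char lists. -/
def mySplit : List Char → List (List Char)
  | [] => [[]]
  | c :: rest => if c = '.' then [] :: mySplit rest else (mySplit rest).modifyHead (c :: ·)

lemma mySplit_ne_nil (l : List Char) : mySplit l ≠ [] := by
  cases l with
  | nil => simp [mySplit]
  | cons c rest =>
    simp only [mySplit]
    split_ifs
    · simp
    · cases h : mySplit rest with
      | nil => exact absurd h (mySplit_ne_nil rest)
      | cons a t => simp [List.modifyHead]

lemma splitOn_go_eq (fuel : Nat) : ∀ (l cur : List Char) (acc : List (List Char)),
    l.length < fuel →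
    PySem.Chars.splitOn.go ['.'] fuel l cur acc
      = acc.reverse ++ (mySplit l).modifyHead (cur.reverse ++ ·) := by
  induction fuel with
  | zero => intro l cur acc h; omega
  | succ f ih =>
    intro l cur acc h
    cases l with
    | nil => simp [PySem.Chars.splitOn.go, mySplit, List.modifyHead]
    | cons c rest =>
      by_cases hc : c = '.'
      · subst hc
        rw [show PySem.Chars.splitOn.go ['.'] (f+1) ('.' :: rest) cur acc
              = PySem.Chars.splitOn.go ['.'] f rest [] (cur.reverse :: acc) by
            simp [PySem.Chars.splitOn.go, List.isPrefixOf]]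
        rw [ih rest [] (cur.reverse :: acc) (by simpa using Nat.lt_of_succ_lt_succ h)]
        cases hm : mySplit rest with
        | nil => exact absurd hm (mySplit_ne_nil rest)
        | cons a t => simp [mySplit, hm, List.modifyHead]
      · rw [show PySem.Chars.splitOn.go ['.'] (f+1) (c :: rest) cur acc
              = PySem.Chars.splitOn.go ['.'] f rest (c :: cur) acc by
            simp [PySem.Chars.splitOn.go, List.isPrefixOf]
            intro h
            exact absurd h.symm hc]
        rw [ih rest (c :: cur) acc (by simpa using Nat.lt_of_succ_lt_succ h)]
        cases hm : mySplit rest with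
        | nil => exact absurd hm (mySplit_ne_nil rest)
        | cons a t => simp [mySplit, hc, hm, List.modifyHead]

lemma splitOn_eq_mySplit (l : List Char) : PySem.Chars.splitOn l ['.'] = mySplit l := by
  have h := splitOn_go_eq (l.length + 1) l [] [] (by omega)
  rw [PySem.Chars.splitOn, h]
  cases hm : mySplit l with
  | nil => exact absurd hm (mySplit_ne_nil l)
  | cons a t => simp [List.modifyHead]

lemma mySplit_append (p d : List Char) :
    mySplit (p ++ '.' :: d) = mySplit p ++ mySplit d := by
  induction p with
  | nil => simp [mySplit]
  | cons c rest ih =>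
    by_cases hc : c = '.'
    · simp [mySplit, hc, ih]
    · cases hm : mySplit rest with
      | nil => exact absurd hm (mySplit_ne_nil rest)
      | cons a t =>
        simp only [List.cons_append, mySplit, hc, if_false, ih, hm, List.modifyHead,
          List.cons_append]

/-- Re-join the labels with '.'; left inverse of `mySplit`. -/
def myJoin : List (List Char) → List Char
  | [] => []
  | [x] => x
  | x :: y :: t => x ++ '.' :: myJoin (y :: t)

lemma myJoin_mySplit (l : List Char) : myJoin (mySplit l) = l := by
  induction l with
  | nil => simp [mySplit, myJoin]
  | cons c rest ih =>
    by_cases hc : c = '.'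
    · cases hm : mySplit rest with
      | nil => exact absurd hm (mySplit_ne_nil rest)
      | cons a t => simp_all [mySplit, myJoin]
    · cases hm : mySplit rest with
      | nil => exact absurd hm (mySplit_ne_nil rest)
      | cons a t =>
        cases t with
        | nil => simp_all [mySplit, List.modifyHead, myJoin]
        | cons b t' => simp_all [mySplit, List.modifyHead, myJoin]

lemma myJoin_cons_append (a : List Char) (t B : List (List Char)) (hB : B ≠ []) :
    myJoin ((a :: t) ++ B) = myJoin (a :: t) ++ '.' :: myJoin B := by
  induction t generalizing a with
  | nil =>
    cases B with
    | nil => exact absurd rfl hB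
    | cons b t'' => simp [myJoin]
  | cons a' t' ih =>
    have ih' := ih a'
    simp only [List.cons_append] at ih' ⊢
    rw [show myJoin (a :: a' :: (t' ++ B)) = a ++ '.' :: myJoin (a' :: (t' ++ B)) from rfl,
        ih',
        show myJoin (a :: a' :: t') = a ++ '.' :: myJoin (a' :: t') from rfl,
        List.append_assoc]
    rfl

lemma myJoin_append (A B : List (List Char)) (hA : A ≠ []) (hB : B ≠ []) :
    myJoin (A ++ B) = myJoin A ++ '.' :: myJoin B := by
  cases A with
  | nil => exact absurd rfl hA
  | cons a t => exact myJoin_cons_append a t B hB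

/-- zip-all-equal with a length bound is the prefix relation. -/
lemma zip_all_eq_iff_prefix {α : Type} [BEq α] [LawfulBEq α] :
    ∀ (ys xs : List α), ys.length ≤ xs.length →
      (((xs.zip ys).all (fun p => p.1 == p.2)) = true ↔ ys <+: xs) := by
  intro ys
  induction ys with
  | nil => intro xs _; simp
  | cons y t ih =>
    intro xs h
    cases xs with
    | nil => simp at h
    | cons x xt =>
      simp only [List.zip_cons_cons, List.all_cons, Bool.and_eq_true, beq_iff_eq,
        List.cons_prefix_cons]
      constructor
      · rintro ⟨h1, h2⟩; exact ⟨h1.symm, (ih xt (by simpa using h)).1 h2⟩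
      · rintro ⟨h1, h2⟩; exact ⟨h1.symm, (ih xt (by simpa using h)).2 h2⟩

/-- The foldl of `acc && (p.1 == p.2)` is `all`. -/
lemma foldl_and_eq_all {α : Type} [BEq α] (l : List (α × α)) :
    ∀ b : Bool, l.foldl (fun acc p => acc && (p.1 == p.2)) b = (b && l.all (fun p => p.1 == p.2)) := by
  induction l with
  | nil => intro b; simp
  | cons p t ih => intro b; simp [List.foldl_cons, ih, Bool.and_assoc]

lemma proper_suffix_iff (S D : List Char) :
    (∃ K, K ≠ [] ∧ mySplit S = K ++ mySplit D) ↔ ('.' :: D) <:+ S := by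
  constructor
  · rintro ⟨K, hK, hS⟩
    refine ⟨myJoin K, ?_⟩
    have := myJoin_mySplit S
    rw [hS, myJoin_append K _ hK (mySplit_ne_nil D), myJoin_mySplit D] at this
    simpa using this
  · rintro ⟨p, hp⟩
    refine ⟨mySplit p, mySplit_ne_nil p, ?_⟩
    rw [← hp, mySplit_append]

lemma main_iff (S D : List Char) :
    (mySplit D).length < (mySplit S).length ∧ (mySplit D).reverse <+: (mySplit S).reverse
      ↔ ('.' :: D) <:+ S := by
  rw [List.reverse_prefix]
  constructor
  · rintro ⟨hlen, hsuf⟩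
    rcases hsuf with ⟨K, hK⟩
    have hKne : K ≠ [] := by
      intro h; subst h; simp at hK; rw [hK] at hlen; omega
    exact (proper_suffix_iff S D).1 ⟨K, hKne, hK.symm⟩
  · intro h
    rcases (proper_suffix_iff S D).2 h with ⟨K, hKne, hS⟩
    refine ⟨?_, ⟨K, hS.symm⟩⟩
    rw [hS]
    cases K with
    | nil => exact absurd rfl hKne
    | cons a t => simp

-- ===== VERDICT (by name: the statement is the Claim_ definition above) =====
theorem is_subdomain_spec : Claim_equal_is_subdomain := by
  intro subdomain domain _
  unfold Spec_is_subdomain is_subdomain is_subdomain_alt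
  simp only [splitOn_eq_mySplit]
  have hend : PySem.Str.endswith subdomain ("." ++ domain)
      = PySem.Chars.endswith subdomain.toList ('.' :: domain.toList) := by
    simp [PySem.Str.endswith]
  rw [hend]
  by_cases hlen :
      (mySplit domain.toList).reverse.length < (mySplit subdomain.toList).reverse.length
  · rw [if_pos hlen, foldl_and_eq_all, Bool.true_and]
    have hle := le_of_lt hlen
    rw [Bool.eq_iff_iff,
        zip_all_eq_iff_prefix (mySplit domain.toList).reverse
          (mySplit subdomain.toList).reverse hle,
        PySem.Chars.endswith_iff]
    simp only [List.length_reverse] at hlen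
    constructor
    · intro hpre; exact (main_iff subdomain.toList domain.toList).1 ⟨hlen, hpre⟩
    · intro h; exact ((main_iff subdomain.toList domain.toList).2 h).2
  · rw [if_neg hlen]
    rcases he : PySem.Chars.endswith subdomain.toList ('.' :: domain.toList) with _ | _
    · rfl
    · exfalso
      have h := (PySem.Chars.endswith_iff subdomain.toList ('.' :: domain.toList)).1 he
      have := ((main_iff subdomain.toList domain.toList).2 h).1
      simp only [List.length_reverse] at hlen
      omega
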